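-- pv_equiv track=rewrite | github.com/midsougou/DAD_library | KernelBased/kernel_library.py | mismatch_kernel
-- ===== SOURCE A (Python) =====
-- def num_mismatches(a, b):
--     # Count how many positions differ
--     return sum(1 for x, y in zip(a, b) if x != y)
--
-- def mismatch_kernel(seq1, seq2, k=3, m=1):
--     kmers1 = {}
--     for i in range(len(seq1) - k + 1):
--         kmer = seq1[i:i+k]
--         kmers1[kmer] = kmers1.get(kmer, 0) + 1
--
--     val = 0
--     # For each k-mer in seq2, accumulate counts from kmers in seq1 that differ <= m
--     for j in range(len(seq2) - k + 1):
--         kmer2 = seq2[j:j+k]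
--         # Check against every kmer1 in seq1 dictionary
--         for kmer1, count1 in kmers1.items():
--             if num_mismatches(kmer1, kmer2) <= m:
--                 val += count1
--     return val
-- ===== SOURCE B (Python) =====
-- def _kmer_counts(s, k):
--     counts = {}
--     for i in range(len(s) - k + 1):
--         w = s[i:i+k]
--         counts[w] = counts.get(w, 0) + 1
--     return counts
--
-- def mismatch_kernel(seq1, seq2, k=3, m=1):
--     # Aggregate both sequences into k-mer multiplicity tables and compare
--     # distinct k-mers pairwise, weighting by the product of multiplicities.
--     counts1 = _kmer_counts(seq1, k)
--     counts2 = _kmer_counts(seq2, k)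
--     total = 0
--     for w2, c2 in counts2.items():
--         for w1, c1 in counts1.items():
--             if sum(x != y for x, y in zip(w1, w2)) <= m:
--                 total += c1 * c2
--     return total
-- ===== Notes on version B (the rewrite author's own statement) =====
-- stated objective: alternative
-- what changed: B aggregates BOTH sequences into k-mer multiplicity tables and compares distinct k-mers pairwise, adding count1*count2 per matching pair, instead of A's re-scanning the seq1 table once for every position of seq2.
import Mathlib
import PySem

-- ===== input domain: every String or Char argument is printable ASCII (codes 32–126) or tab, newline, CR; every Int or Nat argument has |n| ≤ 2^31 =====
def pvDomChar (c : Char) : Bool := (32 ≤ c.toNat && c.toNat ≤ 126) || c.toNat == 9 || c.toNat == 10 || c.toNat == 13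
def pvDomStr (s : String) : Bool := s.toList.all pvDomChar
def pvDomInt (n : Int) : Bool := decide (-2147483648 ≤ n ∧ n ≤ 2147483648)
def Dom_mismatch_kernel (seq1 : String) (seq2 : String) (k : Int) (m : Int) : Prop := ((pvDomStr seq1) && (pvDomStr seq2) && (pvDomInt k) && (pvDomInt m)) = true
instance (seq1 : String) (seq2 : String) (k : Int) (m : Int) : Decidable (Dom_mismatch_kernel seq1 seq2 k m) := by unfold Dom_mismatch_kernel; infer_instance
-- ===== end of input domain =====

-- ===== PORT A =====
-- B re-aggregates seq2's k-mers into a multiplicity table as well, so the pairwise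
-- hamming comparison runs over distinct k-mers of both sequences (weighted by the
-- product of multiplicities) instead of every position of seq2 (objective: alternative).

-- sum(1 for x, y in zip(a, b) if x != y)
def numMismatches (a : List Char) (b : List Char) : Int :=
  (((a.zip b).countP (fun p => p.1 != p.2) : Nat) : Int)

def mismatch_kernel (seq1 : String) (seq2 : String) (k : Int) (m : Int) : Int :=
  let s1 := seq1.toList
  let s2 := seq2.toList
  let kmers1 : PySem.Dict (List Char) Int :=
    (PySem.List.pyRange 0 ((s1.length : Int) - k + 1) 1).foldl
      (fun d i =>
        let kmer := PySem.List.slice s1 (some i) (some (i + k))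
        d.insert kmer (d.getD kmer 0 + 1)) PySem.Dict.empty
  (PySem.List.pyRange 0 ((s2.length : Int) - k + 1) 1).foldl
    (fun val j =>
      let kmer2 := PySem.List.slice s2 (some j) (some (j + k))
      kmers1.items.foldl
        (fun val p => if numMismatches p.1 kmer2 ≤ m then val + p.2 else val) val) 0

-- ===== PORT B =====
-- _kmer_counts(s, k)
def kmerCounts (s : List Char) (k : Int) : PySem.Dict (List Char) Int :=
  (PySem.List.pyRange 0 ((s.length : Int) - k + 1) 1).foldl
    (fun d i =>
      let w := PySem.List.slice s (some i) (some (i + k))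
      d.insert w (d.getD w 0 + 1)) PySem.Dict.empty

def mismatch_kernel_alt (seq1 : String) (seq2 : String) (k : Int) (m : Int) : Int :=
  let counts1 := kmerCounts seq1.toList k
  let counts2 := kmerCounts seq2.toList k
  counts2.items.foldl
    (fun total p2 =>
      counts1.items.foldl
        (fun total p1 =>
          if (((p1.1.zip p2.1).countP (fun q => q.1 != q.2) : Nat) : Int) ≤ m then
            total + p1.2 * p2.2
          else total) total) 0

-- ===== PRECONDITION & SPEC =====
def Spec_mismatch_kernel (seq1 : String) (seq2 : String) (k : Int) (m : Int) (out : Int) : Prop := out = mismatch_kernel_alt seq1 seq2 k m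
instance (seq1 : String) (seq2 : String) (k : Int) (m : Int) (out : Int) : Decidable (Spec_mismatch_kernel seq1 seq2 k m out) := by unfold Spec_mismatch_kernel; infer_instance

-- ===== CLAIM (what is proved, stated in full; the proofs are below) =====
def Claim_equal_mismatch_kernel : Prop := ∀ (seq1 : String) (seq2 : String) (k : Int) (m : Int), Dom_mismatch_kernel seq1 seq2 k m → Spec_mismatch_kernel seq1 seq2 k m (mismatch_kernel seq1 seq2 k m)

-- ===== LEMMAS AND PROOFS =====

-- the list of k-mers (window starts from range(len(s) - k + 1))
def kmerList (s : List Char) (k : Int) : List (List Char) :=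
  (PySem.List.pyRange 0 ((s.length : Int) - k + 1) 1).map
    (fun i => PySem.List.slice s (some i) (some (i + k)))

theorem kmerCounts_eq_counter (s : List Char) (k : Int) :
    kmerCounts s k = PySem.Dict.counter (kmerList s k) := by
  unfold kmerCounts kmerList
  rw [← PySem.Dict.foldl_insert_getD_add_one_eq_counter, List.foldl_map]

-- sum over first-occurrence-deduped elements weighted by multiplicity = plain sum
theorem sum_count_dedup {α : Type} [inst : BEq α] [LawfulBEq α] [DecidableEq α]
    (K : List α) (f : α → Int) :
    ((PySem.Set.ofList K).map (fun w => ((@List.count α inst w K : Nat) : Int) * f w)).sum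
      = (K.map f).sum := by
  have hc : ∀ x : α, @List.count α inst x K = @List.count α (@instBEqOfDecidableEq α _) x K :=
    fun x => by simp [List.count, beq_eq_decide]
  simp only [hc]
  have h1 : ((PySem.Set.ofList K).map
        (fun w => ((@List.count α (@instBEqOfDecidableEq α _) w K : Nat) : Int) * f w)).sum
      = ∑ x ∈ (PySem.Set.ofList K).toFinset,
          ((@List.count α (@instBEqOfDecidableEq α _) x K : Nat) : Int) * f x := by
    rw [List.sum_toFinset _ (PySem.Set.nodup_ofList K)]
  have h2 : (PySem.Set.ofList K).toFinset = K.toFinset := by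
    ext x; simp [PySem.Set.mem_ofList]
  rw [h1, h2, Finset.sum_list_map_count]
  simp

-- A's inner loop over the dict items accumulates a sum of guarded counts
theorem foldl_if_add (l : List (List Char × Int)) (P : List Char → Prop)
    [DecidablePred P] (v : Int) :
    l.foldl (fun v p => if P p.1 then v + p.2 else v) v
      = v + (l.map (fun p => if P p.1 then p.2 else 0)).sum := by
  induction l generalizing v with
  | nil => simp
  | cons p l ih =>
    by_cases h : P p.1
    · simp [h, ih]; ring
    · simp [h, ih]

-- B's inner loop factors out the seq2-side multiplicity c2
theorem foldl_if_add_mul (l : List (List Char × Int)) (P : List Char → Prop)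
    [DecidablePred P] (c2 : Int) (v : Int) :
    l.foldl (fun v p => if P p.1 then v + p.2 * c2 else v) v
      = v + (l.map (fun p => if P p.1 then p.2 else 0)).sum * c2 := by
  induction l generalizing v with
  | nil => simp
  | cons p l ih =>
    by_cases h : P p.1
    · simp [h, ih]; ring
    · simp [h, ih]

-- an accumulate-only foldl is a sum
theorem foldl_add_eq_sum {α : Type} (l : List α) (g : α → Int) (v : Int) :
    l.foldl (fun v x => v + g x) v = v + (l.map g).sum := by
  induction l generalizing v with
  | nil => simp
  | cons x l ih => simp [ih]; ring

-- the guarded-count sum F(w2) both programs accumulate, per seq2-side k-mer w2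
def innerSum (s1 : List Char) (k : Int) (m : Int) (w2 : List Char) : Int :=
  ((PySem.Dict.counter (kmerList s1 k)).items.map
    (fun p => if numMismatches p.1 w2 ≤ m then p.2 else 0)).sum

theorem mismatch_kernel_eq_sum (seq1 seq2 : String) (k m : Int) :
    mismatch_kernel seq1 seq2 k m
      = ((kmerList seq2.toList k).map (innerSum seq1.toList k m)).sum := by
  unfold mismatch_kernel
  dsimp only
  refine (List.foldl_ext _
    (fun val j => val + innerSum seq1.toList k m
      (PySem.List.slice seq2.toList (some j) (some (j + k)))) 0 ?_).trans ?_
  · intro v j _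
    dsimp only
    rw [show (PySem.List.pyRange 0 ((seq1.toList.length : Int) - k + 1) 1).foldl
          (fun d i =>
            let kmer := PySem.List.slice seq1.toList (some i) (some (i + k))
            d.insert kmer (d.getD kmer 0 + 1)) PySem.Dict.empty
        = PySem.Dict.counter (kmerList seq1.toList k) from
      kmerCounts_eq_counter seq1.toList k]
    rw [foldl_if_add _ (fun w => numMismatches w
      (PySem.List.slice seq2.toList (some j) (some (j + k))) ≤ m) v]
    rfl
  · rw [foldl_add_eq_sum, kmerList, List.map_map]
    simp [Function.comp_def]

theorem mismatch_kernel_alt_eq_sum (seq1 seq2 : String) (k m : Int) :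
    mismatch_kernel_alt seq1 seq2 k m
      = ((kmerList seq2.toList k).map (innerSum seq1.toList k m)).sum := by
  unfold mismatch_kernel_alt
  dsimp only
  refine (List.foldl_ext _
    (fun total p2 => total + innerSum seq1.toList k m p2.1 * p2.2) 0 ?_).trans ?_
  · intro v p2 _
    dsimp only
    rw [kmerCounts_eq_counter seq1.toList k]
    rw [foldl_if_add_mul _
      (fun w => (((w.zip p2.1).countP (fun q => q.1 != q.2) : Nat) : Int) ≤ m) p2.2 v]
    rfl
  · rw [foldl_add_eq_sum, kmerCounts_eq_counter seq2.toList k, PySem.Dict.items_counter,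
      List.map_map]
    rw [← sum_count_dedup (kmerList seq2.toList k) (innerSum seq1.toList k m)]
    simp [Function.comp_def, Int.mul_comm]

-- ===== VERDICT (by name: the statement is the Claim_ definition above) =====
theorem mismatch_kernel_spec : Claim_equal_mismatch_kernel := by
  intro seq1 seq2 k m _
  unfold Spec_mismatch_kernel
  rw [mismatch_kernel_eq_sum, mismatch_kernel_alt_eq_sum]
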